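-- pv_equiv track=rewrite | github.com/GerardoGarzon11/advent-of-code-2021 | sonar_sweep.py | count_window_increments
-- ===== SOURCE A (Python) =====
-- def count_window_increments(input_array, window_size):
--     """Returns the number of times the current window had a larger sum than the previous one
--
--     Args:
--         input_array (List): List of values (integers)
--         window_size (int): Size of the window
--
--     Returns:
--         [int]: Number of increments
--     """
--
--     return sum(
--         [
--             1
--             for x in range(0, len(input_array) - window_size)
--             if input_array[x] < input_array[x + window_size]
--         ]
--     )
-- ===== SOURCE B (Python) =====
-- def count_window_increments(input_array, window_size):
--     """Returns the number of times the current window had a larger sum than the previous one"""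
--     if 0 <= window_size <= len(input_array):
--         s = sum(input_array[:window_size])
--         sums = [s]
--         for i in range(len(input_array) - window_size):
--             s += input_array[i + window_size] - input_array[i]
--             sums.append(s)
--     else:
--         sums = []
--     return sum(1 for i in range(len(sums) - 1) if sums[i] < sums[i + 1])
-- ===== Notes on version B (the rewrite author's own statement) =====
-- stated objective: alternative
-- what changed: B reifies the docstring semantics: it builds the list of actual window sums with a running sum (s += arr[i+w] - arr[i]) and counts consecutive increases, instead of A's algebraic shortcut of comparing only the endpoints input_array[x] vs input_array[x+window_size].
import Mathlib
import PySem

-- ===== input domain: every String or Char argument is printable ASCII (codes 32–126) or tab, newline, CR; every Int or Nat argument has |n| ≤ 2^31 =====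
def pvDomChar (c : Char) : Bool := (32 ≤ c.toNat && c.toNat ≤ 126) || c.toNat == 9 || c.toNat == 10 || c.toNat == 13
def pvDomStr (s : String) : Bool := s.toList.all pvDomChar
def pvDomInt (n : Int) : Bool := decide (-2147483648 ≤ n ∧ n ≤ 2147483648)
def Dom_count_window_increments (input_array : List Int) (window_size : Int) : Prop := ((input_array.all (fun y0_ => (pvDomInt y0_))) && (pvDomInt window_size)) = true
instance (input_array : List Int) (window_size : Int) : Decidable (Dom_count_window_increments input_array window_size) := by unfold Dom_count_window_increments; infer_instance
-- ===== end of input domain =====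

-- B counts increases between explicit consecutive window sums instead of A's endpoint comparison; same value, proved equal for window_size ≥ 0.

-- ===== PORT A =====
def count_window_increments (input_array : List Int) (window_size : Int) : Int :=
  (((PySem.List.pyRange 0 ((input_array.length : Int) - window_size) 1).filter
      (fun x => decide (PySem.List.pyGetD input_array x 0 < PySem.List.pyGetD input_array (x + window_size) 0))).map
    (fun _ => (1 : Int))).sum

-- ===== PORT B =====
-- B-side helper: one running-window step, s += arr[i+ws] - arr[i], appending the new window sum
def slideStep (input_array : List Int) (window_size : Int) (p : Int × List Int) (i : Int) : Int × List Int :=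
  let s := p.1 + PySem.List.pyGetD input_array (i + window_size) 0 - PySem.List.pyGetD input_array i 0
  (s, p.2 ++ [s])

def count_window_increments_alt (input_array : List Int) (window_size : Int) : Int :=
  let sums : List Int :=
    if 0 ≤ window_size ∧ window_size ≤ (input_array.length : Int) then
      let s0 : Int := (PySem.List.slice input_array none (some window_size)).sum
      ((PySem.List.pyRange 0 ((input_array.length : Int) - window_size) 1).foldl
        (slideStep input_array window_size) (s0, [s0])).2
    else []
  (((PySem.List.pyRange 0 ((sums.length : Int) - 1) 1).filter
      (fun i => decide (PySem.List.pyGetD sums i 0 < PySem.List.pyGetD sums (i + 1) 0))).map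
    (fun _ => (1 : Int))).sum

-- ===== PRECONDITION & SPEC =====
-- A raises IndexError exactly when window_size < 0 (its index x + window_size runs past the list).
def Pre_count_window_increments (input_array : List Int) (window_size : Int) : Prop := 0 ≤ window_size
instance (input_array : List Int) (window_size : Int) : Decidable (Pre_count_window_increments input_array window_size) := by unfold Pre_count_window_increments; infer_instance
def pvWitness_count_window_increments : List Int × Int := ([1, 2, 3, 1, 5], 3)

def Spec_count_window_increments (input_array : List Int) (window_size : Int) (out : Int) : Prop := out = count_window_increments_alt input_array window_size
instance (input_array : List Int) (window_size : Int) (out : Int) : Decidable (Spec_count_window_increments input_array window_size out) := by unfold Spec_count_window_increments; infer_instance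

-- ===== CLAIM (what is proved, stated in full; the proofs are below) =====
def Claim_equal_count_window_increments : Prop := ∀ (input_array : List Int) (window_size : Int), Dom_count_window_increments input_array window_size → Pre_count_window_increments input_array window_size → Spec_count_window_increments input_array window_size (count_window_increments input_array window_size)
-- ===== LEMMAS AND PROOFS =====

-- The sum of a window shifted by one differs from the previous window's sum by (new endpoint − old endpoint).
lemma take_drop_sum (arr : List Int) (j w : Nat) (h : j + w < arr.length) :
    ((arr.drop (j + 1)).take w).sum + arr.getD j 0
      = ((arr.drop j).take w).sum + arr.getD (j + w) 0 := by
  have hj : j < arr.length := by omega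
  have h1 : arr.drop j = arr[j] :: arr.drop (j + 1) := List.drop_eq_getElem_cons hj
  have h2 : (arr.drop j).take (w + 1) = arr[j] :: (arr.drop (j + 1)).take w := by
    rw [h1, List.take_succ_cons]
  have h3 : (arr.drop j).take (w + 1) = (arr.drop j).take w ++ [arr[j + w]] := by
    rw [List.take_add_one]
    have : (arr.drop j)[w]? = some arr[j + w] := by
      rw [List.getElem?_drop, List.getElem?_eq_getElem h]
    simp [this]
  have hs : arr[j] + ((arr.drop (j + 1)).take w).sum
      = ((arr.drop j).take w).sum + arr[j + w] := by
    have := congrArg List.sum h2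
    rw [h3] at this
    simpa using this.symm
  rw [List.getD_eq_getElem _ _ hj, List.getD_eq_getElem _ _ h]
  omega

lemma window_step (arr : List Int) (ws x : Int) (hws : 0 ≤ ws) (hx : 0 ≤ x)
    (h : x + ws < (arr.length : Int)) :
    (PySem.List.slice arr (some (x + 1)) (some (x + 1 + ws))).sum + PySem.List.pyGetD arr x 0
      = (PySem.List.slice arr (some x) (some (x + ws))).sum + PySem.List.pyGetD arr (x + ws) 0 := by
  lift x to ℕ using hx with j
  lift ws to ℕ using hws with w
  have hjw : j + w < arr.length := by exact_mod_cast h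
  have e1 : (x : Int) = x := rfl
  have c1 : PySem.List.slice arr (some ((j : Int) + 1)) (some ((j : Int) + 1 + (w : Int)))
      = (arr.drop (j + 1)).take w := by
    have : ((j : Int) + 1) = ((j + 1 : Nat) : Int) := by push_cast; ring
    rw [this, PySem.List.slice_natCast_add]
  have c2 : PySem.List.slice arr (some (j : Int)) (some ((j : Int) + (w : Int)))
      = (arr.drop j).take w := PySem.List.slice_natCast_add arr j w
  have c3 : PySem.List.pyGetD arr (j : Int) 0 = arr.getD j 0 := PySem.List.pyGetD_natCast arr j 0
  have c4 : PySem.List.pyGetD arr ((j : Int) + (w : Int)) 0 = arr.getD (j + w) 0 := by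
    have : ((j : Int) + (w : Int)) = ((j + w : Nat) : Int) := by push_cast; ring
    rw [this, PySem.List.pyGetD_natCast]
  rw [c1, c2, c3, c4]
  exact take_drop_sum arr j w hjw


-- The running fold reproduces the per-window slice sums.
lemma fold_windows (arr : List Int) (ws : Int) (hws : 0 ≤ ws) :
    ∀ (k : Nat) (a : Int), 0 ≤ a → a + k = (arr.length : Int) - ws → ∀ (pre : List Int),
    ((PySem.List.pyRange a ((arr.length : Int) - ws) 1).foldl (slideStep arr ws)
        ((PySem.List.slice arr (some a) (some (a + ws))).sum,
         pre ++ [(PySem.List.slice arr (some a) (some (a + ws))).sum])).2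
      = pre ++ (PySem.List.pyRange a ((arr.length : Int) - ws + 1) 1).map
          (fun i => (PySem.List.slice arr (some i) (some (i + ws))).sum) := by
  intro k
  induction k with
  | zero =>
    intro a ha hk pre
    rw [PySem.List.pyRange_one_eq_nil (by omega)]
    have : (arr.length : Int) - ws + 1 = a + 1 := by omega
    rw [this, PySem.List.pyRange_one_singleton]
    simp
  | succ k ih =>
    intro a ha hk pre
    have hlt : a < (arr.length : Int) - ws := by omega
    rw [PySem.List.pyRange_one_cons hlt]
    have key := window_step arr ws a hws ha (by omega)
    have hstep : slideStep arr ws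
        ((PySem.List.slice arr (some a) (some (a + ws))).sum,
         pre ++ [(PySem.List.slice arr (some a) (some (a + ws))).sum]) a
        = ((PySem.List.slice arr (some (a + 1)) (some (a + 1 + ws))).sum,
           (pre ++ [(PySem.List.slice arr (some a) (some (a + ws))).sum])
             ++ [(PySem.List.slice arr (some (a + 1)) (some (a + 1 + ws))).sum]) := by
      unfold slideStep
      dsimp only
      have hv : (PySem.List.slice arr (some a) (some (a + ws))).sum
            + PySem.List.pyGetD arr (a + ws) 0 - PySem.List.pyGetD arr a 0
          = (PySem.List.slice arr (some (a + 1)) (some (a + 1 + ws))).sum := by omega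
      rw [hv]
    rw [List.foldl_cons, hstep,
        ih (a + 1) (by omega) (by omega)
          (pre ++ [(PySem.List.slice arr (some a) (some (a + ws))).sum])]
    rw [PySem.List.pyRange_one_cons (show a < (arr.length : Int) - ws + 1 by omega)]
    simp

-- The sums list B builds is exactly the list of per-window slice sums.
lemma sums_eq (arr : List Int) (ws : Int) (hws : 0 ≤ ws) :
    (if 0 ≤ ws ∧ ws ≤ (arr.length : Int) then
      ((PySem.List.pyRange 0 ((arr.length : Int) - ws) 1).foldl (slideStep arr ws)
        ((PySem.List.slice arr none (some ws)).sum, [(PySem.List.slice arr none (some ws)).sum])).2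
     else [])
    = (PySem.List.pyRange 0 ((arr.length : Int) - ws + 1) 1).map
        (fun i => (PySem.List.slice arr (some i) (some (i + ws))).sum) := by
  by_cases hcase : ws ≤ (arr.length : Int)
  · rw [if_pos ⟨hws, hcase⟩]
    have h0 : (PySem.List.slice arr none (some ws)).sum
        = (PySem.List.slice arr (some (0 : Int)) (some ((0 : Int) + ws))).sum := by
      rw [PySem.List.slice_zero_start, zero_add]
    rw [h0]
    have := fold_windows arr ws hws ((arr.length : Int) - ws).toNat 0 le_rfl (by omega) []
    simpa using this
  · rw [if_neg (by tauto)]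
    rw [PySem.List.pyRange_one_eq_nil (by omega)]
    simp

-- ===== VERDICT (by name: the statement is the Claim_ definition above) =====
theorem count_window_increments_spec : Claim_equal_count_window_increments := by
  intro arr ws _ hws
  unfold Spec_count_window_increments count_window_increments count_window_increments_alt
  dsimp only
  rw [sums_eq arr ws hws]
  by_cases hle : (arr.length : Int) - ws ≤ 0
  · -- no window comparison happens on either side: both ranges are empty
    have hlen : ((((PySem.List.pyRange 0 ((arr.length : Int) - ws + 1) 1).map
        (fun i => (PySem.List.slice arr (some i) (some (i + ws))).sum)).length : Int) - 1 ≤ 0) := by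
      simp [List.length_map, PySem.List.length_pyRange_one]
      omega
    rw [PySem.List.pyRange_one_eq_nil hle, PySem.List.pyRange_one_eq_nil hlen]
    simp
  · push_neg at hle
    have hlen : ((((PySem.List.pyRange 0 ((arr.length : Int) - ws + 1) 1).map
        (fun i => (PySem.List.slice arr (some i) (some (i + ws))).sum)).length : Int) - 1)
        = (arr.length : Int) - ws := by
      simp [List.length_map, PySem.List.length_pyRange_one]
      omega
    rw [hlen]
    refine congrArg (fun l => (List.map (fun _ => (1 : Int)) l).sum) (List.filter_congr ?_)
    intro x hx
    obtain ⟨hx0, hxlt⟩ := PySem.List.mem_pyRange_one.mp hx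
    have g1 : PySem.List.pyGetD ((PySem.List.pyRange 0 ((arr.length : Int) - ws + 1) 1).map
        (fun i => (PySem.List.slice arr (some i) (some (i + ws))).sum)) x 0
        = (PySem.List.slice arr (some x) (some (x + ws))).sum :=
      PySem.List.pyGetD_map_pyRange_of_nonneg _ _ _ _ hx0 (by omega)
    have g2 : PySem.List.pyGetD ((PySem.List.pyRange 0 ((arr.length : Int) - ws + 1) 1).map
        (fun i => (PySem.List.slice arr (some i) (some (i + ws))).sum)) (x + 1) 0
        = (PySem.List.slice arr (some (x + 1)) (some (x + 1 + ws))).sum :=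
      PySem.List.pyGetD_map_pyRange_of_nonneg _ _ _ _ (by omega) (by omega)
    rw [g1, g2]
    have key := window_step arr ws x hws hx0 (by omega)
    simp only [decide_eq_decide]
    constructor <;> intro <;> omega
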